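-- pv_equiv track=rewrite | github.com/Arctice/advent-of-code | 2019/17.py | separate_program
-- ===== SOURCE A (Python) =====
-- def prefixes(program):
--     for l in range(2, 1 + min(20, len(program))):
--         yield program[:l]
--
-- def separate_program(program, splits):
--     subname = 'CBA' [splits]
--     first_substr = program.replace('A', '_').replace('B', '_').split('_')
--     first_substr = [s for s in first_substr if s][0]
--
--     for prefix in prefixes(first_substr):
--         substituted = program.replace(prefix, subname)
--         if splits == 0:
--             candidate = substituted
--             if set(candidate) == set('ABC'):
--                 return (prefix, candidate)
--         else:
--             candidate = separate_program(substituted, splits - 1)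
--             if not candidate:
--                 continue
--             return (prefix, ) + candidate
-- ===== SOURCE B (Python) =====
-- def separate_program(program, splits):
--     # Explicit-stack preorder DFS over the prefix-choice tree (head of list = top of stack
--     # via append/pop); children pushed in reverse length order so the shortest prefix is
--     # explored first, reproducing the recursion's first-match order.
--     stack = [(program, splits, ())]
--     while stack:
--         prog, k, path = stack.pop()
--         subname = 'CBA'[k]
--         first = [s for s in prog.replace('A', '_').replace('B', '_').split('_') if s][0]
--         cands = [first[:l] for l in range(2, 1 + min(20, len(first)))]
--         if k == 0:
--             hit = next((p for p in cands if set(prog.replace(p, subname)) == set('ABC')), None)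
--             if hit is not None:
--                 return path + (hit, prog.replace(hit, subname))
--         else:
--             for p in reversed(cands):
--                 stack.append((prog.replace(p, subname), k - 1, path + (p,)))
--     return None
-- ===== Notes on version B (the rewrite author's own statement) =====
-- stated objective: alternative
-- what changed: A's recursive backtracking over prefix choices is replaced by an iterative preorder DFS with an explicit stack of (program, splits_remaining, prefix_path) states, children pushed in reverse length order so the same first match is returned.
import Mathlib
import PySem

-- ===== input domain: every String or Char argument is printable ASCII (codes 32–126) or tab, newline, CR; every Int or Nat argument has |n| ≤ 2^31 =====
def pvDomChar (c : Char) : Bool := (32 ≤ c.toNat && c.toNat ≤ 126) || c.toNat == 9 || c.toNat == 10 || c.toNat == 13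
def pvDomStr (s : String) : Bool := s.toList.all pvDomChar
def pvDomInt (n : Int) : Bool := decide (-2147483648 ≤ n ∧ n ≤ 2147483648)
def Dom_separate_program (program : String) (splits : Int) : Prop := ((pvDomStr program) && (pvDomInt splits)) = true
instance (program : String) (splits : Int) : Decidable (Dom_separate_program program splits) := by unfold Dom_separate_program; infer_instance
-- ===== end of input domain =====

-- B replaces A's recursive backtracking by an explicit-stack preorder DFS over the prefix-choice
-- tree (children pushed in reverse order so the same first match is found); same cost, different
-- decomposition ("alternative"). Return-value equality is proved on Pre_, which excludes exactly
-- the inputs on which A raises (both Pythons raise IndexError at the same point of the search).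

-- ===== PORT A =====
-- shared primitive helpers (both Pythons evaluate these identical expressions)
-- first_substr = [s for s in program.replace('A','_').replace('B','_').split('_') if s][0]
-- (split? with sep = "_" ≠ "" never returns none, so the .getD [] is inert); none = IndexError [..][0]
def pvFirstSubstr? (program : String) : Option String :=
  (((PySem.Str.split? (PySem.Str.replace (PySem.Str.replace program "A" "_") "B" "_") "_").getD
      []).filter (fun t => t != "")).head?

-- prefixes(s): s[:l] for l in range(2, 1 + min(20, len(s)))
def pvPrefixes (s : String) : List String :=
  (PySem.List.pyRange 2 (1 + min 20 (PySem.Str.len s)) 1).map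
    (fun l => PySem.Str.slice s none (some l))

-- set(candidate) == set('ABC')
def pvIsABC (s : String) : Bool :=
  PySem.Set.equal (PySem.Set.ofList s.toList) (PySem.Set.ofList "ABC".toList)

-- A's for-loop body: `recur` is the recursive call `separate_program(substituted, splits - 1)`
def pvLoopA (recur : String → Option (List String)) (program : String) (splits : Int)
    (subname : String) : List String → Option (List String)
  | [] => none
  | pfx :: rest =>
    let substituted := PySem.Str.replace program pfx subname
    if splits = 0 then
      if pvIsABC substituted then some [pfx, substituted]
      else pvLoopA recur program splits subname rest
    else
      match recur substituted with
      | none => pvLoopA recur program splits subname rest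
      | some c => some (pfx :: c)

-- literal port of A: subname = 'CBA'[splits] (none = IndexError, outside Pre_), then the loop.
-- The Nat fuel is a totality guard only: the fuel (splits+4).toNat+1 passed below exceeds the
-- recursion depth on every input (each level decrements splits; levels below -3 return at once),
-- so the `0` branch is unreachable.
def pvSepGo : Nat → String → Int → Option (List String)
  | 0, _, _ => none
  | fuel + 1, program, splits =>
    match PySem.Str.pyGet? "CBA" splits with
    | none => none
    | some c =>
      match pvFirstSubstr? program with
      | none => none
      | some first =>
        pvLoopA (fun t => pvSepGo fuel t (splits - 1)) program splits (String.singleton c)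
          (pvPrefixes first)

def separate_program (program : String) (splits : Int) : Option (List String) :=
  pvSepGo ((splits + 4).toNat + 1) program splits

-- ===== PORT B =====
-- stack entries (current_program, splits_remaining, prefix_path); head of list = top of stack
def pvWeight (k : Int) : Nat := 20 ^ (k + 4).toNat
def pvMeasure (stack : List (String × Int × List String)) : Nat :=
  (stack.map (fun e => pvWeight e.2.1)).sum

-- literal port of B (Source B): while stack: pop; 'CBA'[k]; first substring; candidate prefixes;
-- at k == 0 scan for the first working prefix (next(...) = List.find?), otherwise push the
-- children in reverse length order — on a head-of-list stack that is prepending them in order.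
-- The Nat fuel is a totality guard only: each iteration strictly shrinks pvMeasure, and the
-- wrapper passes the initial pvMeasure, so the fuel-exhausted branch is unreachable.
def pvLoopB : Nat → List (String × Int × List String) → Option (List String)
  | _, [] => none
  | 0, _ :: _ => none
  | fuel + 1, (prog, k, path) :: rest =>
    match PySem.Str.pyGet? "CBA" k with
    | none => none  -- IndexError, outside Pre_
    | some c =>
      match pvFirstSubstr? prog with
      | none => none  -- IndexError, outside Pre_
      | some first =>
        let cands := pvPrefixes first
        if k = 0 then
          match cands.find?
              (fun p => pvIsABC (PySem.Str.replace prog p (String.singleton c))) with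
          | some p => some (path ++ [p, PySem.Str.replace prog p (String.singleton c)])
          | none => pvLoopB fuel rest
        else
          pvLoopB fuel
            ((cands.map
                (fun p => (PySem.Str.replace prog p (String.singleton c), k - 1, path ++ [p]))) ++
              rest)

def separate_program_alt (program : String) (splits : Int) : Option (List String) :=
  pvLoopB (pvMeasure [(program, splits, [])]) [(program, splits, [])]

-- ===== PRECONDITION & SPEC =====
-- Outcome of A's search at one node of the prefix-choice tree, read off the input:
-- does the preorder scan below this node hit an IndexError before it can win or exhaust?
inductive PvStat : Type
  | raise : PvStat
  | win : PvStat
  | fail : PvStat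
deriving DecidableEq, Repr

-- first result ≠ fail of f along a list (A's loop order): raise/win as soon as seen
def pvScan {α : Type} (f : α → PvStat) : List α → PvStat
  | [] => PvStat.fail
  | x :: r => match f x with
    | PvStat.raise => PvStat.raise
    | PvStat.win => PvStat.win
    | PvStat.fail => pvScan f r

def pvSegPrefixes (s : String) : List String := pvPrefixes ((pvFirstSubstr? s).getD "")
def pvChildren (s : String) (c : String) : List String :=
  (pvSegPrefixes s).map (fun p => PySem.Str.replace s p c)
def pvHasSeg (s : String) : Bool := (pvFirstSubstr? s).isSome
def pvWin0 (s : String) : Bool :=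
  (pvSegPrefixes s).any (fun p => pvIsABC (PySem.Str.replace s p (String.singleton 'C')))

def pvStat0 (s : String) : PvStat :=
  if pvHasSeg s then (if pvWin0 s then PvStat.win else PvStat.fail) else PvStat.raise
-- at splits = -3 every child call raises at once ('CBA'[-4]); at -2/-1 recurse one level down
def pvStatM3 (s : String) : PvStat :=
  if pvHasSeg s then pvScan (fun _ => PvStat.raise) (pvChildren s "C") else PvStat.raise
def pvStatM2 (s : String) : PvStat :=
  if pvHasSeg s then pvScan pvStatM3 (pvChildren s "B") else PvStat.raise
def pvStatM1 (s : String) : PvStat :=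
  if pvHasSeg s then pvScan pvStatM2 (pvChildren s "A") else PvStat.raise
def pvStat1 (s : String) : PvStat :=
  if pvHasSeg s then pvScan pvStat0 (pvChildren s "B") else PvStat.raise
def pvStat2 (s : String) : PvStat :=
  if pvHasSeg s then pvScan pvStat1 (pvChildren s "A") else PvStat.raise
def pvStat (s : String) (k : Int) : PvStat :=
  if k = 0 then pvStat0 s
  else if k = 1 then pvStat1 s
  else if k = 2 then pvStat2 s
  else if k = -1 then pvStatM1 s
  else if k = -2 then pvStatM2 s
  else if k = -3 then pvStatM3 s
  else PvStat.raise

-- Pre_ excludes EXACTLY the inputs on which A raises an IndexError ('CBA'[splits] out of range,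
-- or a visited node whose program has no non-A/B segment, or recursion past splits = -3 before
-- the search wins); on every input where A returns a value, Pre_ holds (and both Pythons raise
-- identically outside it, since B visits the same nodes in the same preorder).
def Pre_separate_program (program : String) (splits : Int) : Prop :=
  pvStat program splits ≠ PvStat.raise
instance (program : String) (splits : Int) : Decidable (Pre_separate_program program splits) := by
  unfold Pre_separate_program; infer_instance

def pvWitness_separate_program : String × Int := ("xAyB", 0)

def Spec_separate_program (program : String) (splits : Int) (out : Option (List String)) : Prop :=
  out = separate_program_alt program splits
instance (program : String) (splits : Int) (out : Option (List String)) :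
    Decidable (Spec_separate_program program splits out) := by
  unfold Spec_separate_program; infer_instance

-- ===== CLAIM (what is proved, stated in full; the proofs are below) =====
def Claim_equal_separate_program : Prop :=
  ∀ (program : String) (splits : Int), Dom_separate_program program splits →
    Pre_separate_program program splits →
    Spec_separate_program program splits (separate_program program splits)

-- ===== LEMMAS AND PROOFS =====

theorem pvMeasure_cons (e : String × Int × List String) (r : List (String × Int × List String)) :
    pvMeasure (e :: r) = pvWeight e.2.1 + pvMeasure r := by
  simp [pvMeasure]

theorem pvWeight_pos (k : Int) : 1 ≤ pvWeight k := Nat.one_le_pow _ _ (by norm_num)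

-- pushing the ≤ 19 children (weight 20^(k+3) each) of a popped node of weight 20^(k+4)
-- shrinks the total stack weight
theorem pvPush_lt (k : Int) (hk : -3 ≤ k) (cands : List String)
    (f : String → String × Int × List String) (hf : ∀ p, (f p).2.1 = k - 1)
    (hlen : cands.length ≤ 19) (r : List (String × Int × List String)) :
    pvMeasure (cands.map f ++ r) < pvWeight k + pvMeasure r := by
  have h1 : pvMeasure (cands.map f ++ r) = cands.length * pvWeight (k - 1) + pvMeasure r := by
    simp only [pvMeasure, List.map_append, List.sum_append, List.map_map]
    congr 1
    have hmap : cands.map (fun p => pvWeight (f p).2.1) =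
        cands.map (fun _ => pvWeight (k - 1)) :=
      List.map_congr_left (fun p _ => by rw [hf])
    rw [show ((fun e : String × Int × List String => pvWeight e.2.1) ∘ f) =
        (fun p => pvWeight (f p).2.1) from rfl, hmap, List.map_const']
    simp [List.sum_replicate, smul_eq_mul]
  rw [h1]
  have h2 : (k + 4).toNat = (k - 1 + 4).toNat + 1 := by omega
  have h3 : pvWeight k = 20 * pvWeight (k - 1) := by
    simp [pvWeight, h2, pow_succ, Nat.mul_comm]
  have h4 := pvWeight_pos (k - 1)
  have h5 : cands.length * pvWeight (k - 1) < 20 * pvWeight (k - 1) :=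
    Nat.mul_lt_mul_of_lt_of_le (by omega) (le_refl _) (by omega)
  omega

theorem pvGetCBA_bound (k : Int) (c : Char) (h : PySem.Str.pyGet? "CBA" k = some c) :
    -3 ≤ k ∧ k < 3 := by
  have hin : PySem.Raise.InRange ("CBA".toList.length) k := by
    by_contra hn
    rw [show PySem.Str.pyGet? "CBA" k = PySem.List.pyGet? "CBA".toList k from rfl,
      (PySem.List.pyGet?_eq_none_iff _ _).2 hn] at h
    simp at h
  simpa [PySem.Raise.InRange] using hin

theorem pvPrefixes_len (s : String) : (pvPrefixes s).length ≤ 19 := by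
  simp only [pvPrefixes, List.length_map]
  simp [pysem]
  omega

-- A's answer for a whole stack of pending DFS states: first state whose recursive search succeeds
def pvFold : List (String × Int × List String) → Option (List String)
  | [] => none
  | (s, k, p) :: r =>
    match separate_program s k with
    | some v => some (p ++ v)
    | none => pvFold r

-- combined raise-status of the pending stack, in A's visit order
def pvFoldStat (stack : List (String × Int × List String)) : PvStat :=
  pvScan (fun e => pvStat e.1 e.2.1) stack

theorem pvSep_eq (program : String) (splits : Int) :
    separate_program program splits =
      match PySem.Str.pyGet? "CBA" splits with
      | none => none
      | some c =>
        match pvFirstSubstr? program with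
        | none => none
        | some first =>
          pvLoopA (fun t => separate_program t (splits - 1)) program splits
            (String.singleton c) (pvPrefixes first) := by
  rw [separate_program, pvSepGo]
  cases hc : PySem.Str.pyGet? "CBA" splits with
  | none => rfl
  | some c =>
    cases hf : pvFirstSubstr? program with
    | none => rfl
    | some first =>
      simp only []
      have hfuel : (splits + 4).toNat = (splits - 1 + 4).toNat + 1 := by
        have := pvGetCBA_bound splits c hc
        omega
      have : (fun t => pvSepGo ((splits + 4).toNat) t (splits - 1)) =
          (fun t => separate_program t (splits - 1)) := by
        funext t
        rw [hfuel]
        rfl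
      rw [this]

theorem pvLoopA_zero (recur : String → Option (List String)) (prog subname : String)
    (ps : List String) :
    pvLoopA recur prog 0 subname ps =
      (ps.find? (fun p => pvIsABC (PySem.Str.replace prog p subname))).map
        (fun p => [p, PySem.Str.replace prog p subname]) := by
  induction ps with
  | nil => simp [pvLoopA]
  | cons p rest ih =>
    rw [pvLoopA]
    by_cases hp : pvIsABC (PySem.Str.replace prog p subname) <;> simp [hp, List.find?, ih]

theorem pvFold_children (prog : String) (k : Int) (sub : String) (path : List String)
    (r : List (String × Int × List String)) (ps : List String) (hk : ¬ k = 0) :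
    pvFold ((ps.map (fun p => (PySem.Str.replace prog p sub, k - 1, path ++ [p]))) ++ r) =
      match pvLoopA (fun t => separate_program t (k - 1)) prog k sub ps with
      | some v => some (path ++ v)
      | none => pvFold r := by
  induction ps with
  | nil => simp [pvLoopA]
  | cons p rest ih =>
    rw [pvLoopA]
    simp only [hk, if_false, List.map_cons, List.cons_append, pvFold]
    cases separate_program (PySem.Str.replace prog p sub) (k - 1) with
    | none => simpa using ih
    | some v => simp

theorem pvScan_append {α : Type} (f : α → PvStat) (l1 l2 : List α) :
    pvScan f (l1 ++ l2) =
      match pvScan f l1 with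
      | PvStat.raise => PvStat.raise
      | PvStat.win => PvStat.win
      | PvStat.fail => pvScan f l2 := by
  induction l1 with
  | nil => simp [pvScan]
  | cons x r ih =>
    simp only [List.cons_append, pvScan]
    cases f x <;> simp [ih]

theorem pvScan_map {α β : Type} (f : β → PvStat) (g : α → β) (l : List α) :
    pvScan f (l.map g) = pvScan (fun x => f (g x)) l := by
  induction l with
  | nil => rfl
  | cons x r ih =>
    simp only [List.map_cons, pvScan]
    cases f (g x) <;> simp [ih]

theorem pvStat_valid (s : String) (k : Int) (h : pvStat s k ≠ PvStat.raise) :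
    (∃ c, PySem.Str.pyGet? "CBA" k = some c) ∧ (∃ first, pvFirstSubstr? s = some first) := by
  unfold pvStat at h
  have hseg : pvHasSeg s = true → ∃ first, pvFirstSubstr? s = some first := by
    intro hs
    exact Option.isSome_iff_exists.1 hs
  split_ifs at h with h0 h1 h2 hm1 hm2 hm3
  · subst h0
    refine ⟨⟨'C', by decide⟩, ?_⟩
    unfold pvStat0 at h
    by_cases hs : pvHasSeg s = true
    · exact hseg hs
    · simp [hs] at h
  · subst h1
    refine ⟨⟨'B', by decide⟩, ?_⟩
    unfold pvStat1 at h
    by_cases hs : pvHasSeg s = true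
    · exact hseg hs
    · simp [hs] at h
  · subst h2
    refine ⟨⟨'A', by decide⟩, ?_⟩
    unfold pvStat2 at h
    by_cases hs : pvHasSeg s = true
    · exact hseg hs
    · simp [hs] at h
  · subst hm1
    refine ⟨⟨'A', by decide⟩, ?_⟩
    unfold pvStatM1 at h
    by_cases hs : pvHasSeg s = true
    · exact hseg hs
    · simp [hs] at h
  · subst hm2
    refine ⟨⟨'B', by decide⟩, ?_⟩
    unfold pvStatM2 at h
    by_cases hs : pvHasSeg s = true
    · exact hseg hs
    · simp [hs] at h
  · subst hm3
    refine ⟨⟨'C', by decide⟩, ?_⟩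
    unfold pvStatM3 at h
    by_cases hs : pvHasSeg s = true
    · exact hseg hs
    · simp [hs] at h
  · exact absurd rfl h

theorem pvSegPrefixes_eq (s first : String) (hf : pvFirstSubstr? s = some first) :
    pvSegPrefixes s = pvPrefixes first := by
  simp [pvSegPrefixes, hf]

-- at a non-base node, the status is the scan of the pushed children's statuses one level down
theorem pvStat_children (s : String) (k : Int) (c : Char) (first : String)
    (hk : ¬ k = 0) (hc : PySem.Str.pyGet? "CBA" k = some c)
    (hf : pvFirstSubstr? s = some first) (h : pvStat s k ≠ PvStat.raise) :
    pvStat s k =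
      pvScan (fun t => pvStat t (k - 1))
        ((pvPrefixes first).map (fun p => PySem.Str.replace s p (String.singleton c))) := by
  have hs : pvHasSeg s = true := by simp [pvHasSeg, hf]
  have hch : ∀ d : String, pvChildren s d =
      (pvPrefixes first).map (fun p => PySem.Str.replace s p d) := by
    intro d
    simp [pvChildren, pvSegPrefixes_eq s first hf]
  have hb := pvGetCBA_bound k c hc
  have hk5 : k = 1 ∨ k = 2 ∨ k = -1 ∨ k = -2 ∨ k = -3 := by omega
  rcases hk5 with rfl | rfl | rfl | rfl | rfl
  · -- k = 1, subname 'B'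
    rw [show PySem.Str.pyGet? "CBA" (1 : Int) = some 'B' from by decide] at hc
    obtain rfl : c = 'B' := (Option.some.inj hc).symm
    have e1 : pvStat s 1 = pvStat1 s := by
      rw [pvStat, if_neg (by norm_num : ¬(1:Int) = 0), if_pos rfl]
    have e2 : (fun t : String => pvStat t (1 - 1)) = pvStat0 := by
      funext t
      rw [pvStat, if_pos (by norm_num : (1:Int) - 1 = 0)]
    rw [e1, e2, pvStat1, if_pos hs, hch "B"]
    rfl
  · -- k = 2, subname 'A'
    rw [show PySem.Str.pyGet? "CBA" (2 : Int) = some 'A' from by decide] at hc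
    obtain rfl : c = 'A' := (Option.some.inj hc).symm
    have e1 : pvStat s 2 = pvStat2 s := by
      rw [pvStat, if_neg (by norm_num : ¬(2:Int) = 0), if_neg (by norm_num : ¬(2:Int) = 1), if_pos rfl]
    have e2 : (fun t : String => pvStat t (2 - 1)) = pvStat1 := by
      funext t
      rw [pvStat, if_neg (by norm_num : ¬(2:Int) - 1 = 0), if_pos (by norm_num : (2:Int) - 1 = 1)]
    rw [e1, e2, pvStat2, if_pos hs, hch "A"]
    rfl
  · -- k = -1, subname 'A'
    rw [show PySem.Str.pyGet? "CBA" (-1 : Int) = some 'A' from by decide] at hc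
    obtain rfl : c = 'A' := (Option.some.inj hc).symm
    have e1 : pvStat s (-1) = pvStatM1 s := by
      rw [pvStat, if_neg (by norm_num : ¬(-1:Int) = 0), if_neg (by norm_num : ¬(-1:Int) = 1), if_neg (by norm_num : ¬(-1:Int) = 2), if_pos rfl]
    have e2 : (fun t : String => pvStat t (-1 - 1)) = pvStatM2 := by
      funext t
      rw [pvStat, if_neg (by norm_num : ¬(-1:Int) - 1 = 0), if_neg (by norm_num : ¬(-1:Int) - 1 = 1), if_neg (by norm_num : ¬(-1:Int) - 1 = 2), if_neg (by norm_num : ¬(-1:Int) - 1 = -1), if_pos (by norm_num : (-1:Int) - 1 = -2)]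
    rw [e1, e2, pvStatM1, if_pos hs, hch "A"]
    rfl
  · -- k = -2, subname 'B'
    rw [show PySem.Str.pyGet? "CBA" (-2 : Int) = some 'B' from by decide] at hc
    obtain rfl : c = 'B' := (Option.some.inj hc).symm
    have e1 : pvStat s (-2) = pvStatM2 s := by
      rw [pvStat, if_neg (by norm_num : ¬(-2:Int) = 0), if_neg (by norm_num : ¬(-2:Int) = 1), if_neg (by norm_num : ¬(-2:Int) = 2), if_neg (by norm_num : ¬(-2:Int) = -1), if_pos rfl]
    have e2 : (fun t : String => pvStat t (-2 - 1)) = pvStatM3 := by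
      funext t
      rw [pvStat, if_neg (by norm_num : ¬(-2:Int) - 1 = 0), if_neg (by norm_num : ¬(-2:Int) - 1 = 1), if_neg (by norm_num : ¬(-2:Int) - 1 = 2), if_neg (by norm_num : ¬(-2:Int) - 1 = -1), if_neg (by norm_num : ¬(-2:Int) - 1 = -2), if_pos (by norm_num : (-2:Int) - 1 = -3)]
    rw [e1, e2, pvStatM2, if_pos hs, hch "B"]
    rfl
  · -- k = -3, subname 'C' (every child raises at once)
    rw [show PySem.Str.pyGet? "CBA" (-3 : Int) = some 'C' from by decide] at hc
    obtain rfl : c = 'C' := (Option.some.inj hc).symm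
    have e1 : pvStat s (-3) = pvStatM3 s := by
      rw [pvStat, if_neg (by norm_num : ¬(-3:Int) = 0), if_neg (by norm_num : ¬(-3:Int) = 1), if_neg (by norm_num : ¬(-3:Int) = 2), if_neg (by norm_num : ¬(-3:Int) = -1), if_neg (by norm_num : ¬(-3:Int) = -2), if_pos rfl]
    have e2 : (fun t : String => pvStat t (-3 - 1)) = fun _ => PvStat.raise := by
      funext t
      rw [pvStat, if_neg (by norm_num : ¬(-3:Int) - 1 = 0), if_neg (by norm_num : ¬(-3:Int) - 1 = 1), if_neg (by norm_num : ¬(-3:Int) - 1 = 2), if_neg (by norm_num : ¬(-3:Int) - 1 = -1), if_neg (by norm_num : ¬(-3:Int) - 1 = -2), if_neg (by norm_num : ¬(-3:Int) - 1 = -3)]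
    rw [e1, e2, pvStatM3, if_pos hs, hch "C"]
    rfl

-- the DFS loop of B computes, on a raise-free stack with enough fuel, A's first-success fold
theorem pvLoopB_eq_fold (fuel : Nat) :
    ∀ stack : List (String × Int × List String), pvMeasure stack ≤ fuel →
      pvFoldStat stack ≠ PvStat.raise → pvLoopB fuel stack = pvFold stack := by
  induction fuel with
  | zero =>
    intro stack hm _
    match stack with
    | [] => rfl
    | e :: r =>
      have hm' : pvWeight e.2.1 + pvMeasure r ≤ 0 := by rw [pvMeasure_cons] at hm; exact hm
      exact absurd hm' (by have := pvWeight_pos e.2.1; omega)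
  | succ n ih =>
    intro stack hm hsafe
    match stack with
    | [] => rfl
    | (prog, k, path) :: rest =>
      have hhead : pvStat prog k ≠ PvStat.raise := by
        intro hr
        apply hsafe
        simp [pvFoldStat, pvScan, hr]
      rcases pvStat_valid prog k hhead with ⟨⟨c, hc⟩, ⟨first, hf⟩⟩
      have hm' : pvWeight k + pvMeasure rest ≤ n + 1 := by rw [pvMeasure_cons] at hm; exact hm
      have hmr : pvMeasure rest ≤ n := by have := pvWeight_pos k; omega
      have hrest_of_fail : pvStat prog k = PvStat.fail → pvFoldStat rest ≠ PvStat.raise := by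
        intro hfl hr
        apply hsafe
        simp [pvFoldStat, pvScan, hfl]
        exact hr
      by_cases hk : k = 0
      · subst hk
        have hcC : c = 'C' := by
          rw [show PySem.Str.pyGet? "CBA" (0 : Int) = some 'C' from by decide] at hc
          exact (Option.some.inj hc).symm
        subst hcC
        rw [pvLoopB]
        simp only [hc, hf]
        rw [pvFold, pvSep_eq]
        simp only [hc, hf]
        rw [pvLoopA_zero]
        cases hfind : (pvPrefixes first).find?
            (fun p => pvIsABC (PySem.Str.replace prog p (String.singleton 'C'))) with
        | none =>
          have hfail : pvStat prog 0 = PvStat.fail := by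
            have hs : pvHasSeg prog = true := by simp [pvHasSeg, hf]
            have hwin : pvWin0 prog = false := by
              rw [pvWin0, pvSegPrefixes_eq prog first hf, List.any_eq_false]
              intro p hp
              simpa using List.find?_eq_none.1 hfind p hp
            simp [pvStat, pvStat0, hs, hwin]
          have := hrest_of_fail hfail
          simpa using ih rest hmr this
        | some p => simp
      · have hbound := pvGetCBA_bound k c hc
        rw [pvLoopB]
        simp only [hc, hf, if_neg hk]
        have hmp : pvMeasure ((pvPrefixes first).map
            (fun p => (PySem.Str.replace prog p (String.singleton c), k - 1, path ++ [p])) ++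
            rest) ≤ n := by
          have := pvPush_lt k hbound.1 (pvPrefixes first)
            (fun p => (PySem.Str.replace prog p (String.singleton c), k - 1, path ++ [p]))
            (fun p => rfl) (pvPrefixes_len first) rest
          omega
        have hchildren := pvStat_children prog k c first hk hc hf hhead
        have hstat : pvFoldStat ((pvPrefixes first).map
            (fun p => (PySem.Str.replace prog p (String.singleton c), k - 1, path ++ [p])) ++
            rest) ≠ PvStat.raise := by
          rw [pvFoldStat, pvScan_append, pvScan_map]
          have hsc : pvScan
              (fun x => pvStat (PySem.Str.replace prog x (String.singleton c), k - 1,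
                path ++ [x]).1 (PySem.Str.replace prog x (String.singleton c), k - 1,
                path ++ [x]).2.1) (pvPrefixes first) = pvStat prog k := by
            rw [hchildren, pvScan_map]
          rw [hsc]
          cases hst : pvStat prog k with
          | raise => exact absurd hst hhead
          | win => simp
          | fail => simpa using hrest_of_fail hst
        rw [ih _ hmp hstat]
        rw [pvFold_children prog k (String.singleton c) path rest (pvPrefixes first) hk]
        rw [pvFold, pvSep_eq]
        simp only [hc, hf]

-- ===== VERDICT (by name: the statement is the Claim_ definition above) =====
theorem separate_program_spec : Claim_equal_separate_program := by
  unfold Claim_equal_separate_program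
  intro program splits _ hpre
  unfold Spec_separate_program separate_program_alt
  rw [pvLoopB_eq_fold (pvMeasure [(program, splits, [])]) _ (le_refl _)
    (by
      intro hr
      apply hpre
      rw [pvFoldStat, pvScan] at hr
      cases hst : pvStat program splits with
      | raise => rfl
      | win => rw [hst] at hr; exact absurd hr (by simp)
      | fail => rw [hst] at hr; exact absurd hr (by simp [pvScan]))]
  rw [pvFold]
  cases h : separate_program program splits <;> simp [pvFold]
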